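-- pv_equiv track=rewrite | github.com/iungyu-snu/ActFormer | data/data.py | verify_and_modify_sequence
-- ===== SOURCE A (Python) =====
-- from typing import Dict, List
--
-- def verify_and_modify_sequence(sequence: str, mutations: List[tuple]) -> str:
--     """Verify mutations against sequence and modify if valid"""
--     if not mutations:
--         return sequence
--
--     modified_seq = list(sequence)
--     errors = []
--
--     for wt, pos, mut in mutations:
--         # Convert position to 0-based index
--         idx = pos - 1
--
--         # Verify position is within sequence
--         if idx >= len(sequence):
--             errors.append(f"Error: Mutation position {pos} is outside sequence length {len(sequence)}")
--             continue
--
--         # Verify wild type amino acid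
--         if sequence[idx] != wt:
--             errors.append(f"Error: Expected {wt} at position {pos} but found {sequence[idx]}")
--             continue
--
--         # Apply mutation
--         modified_seq[idx] = mut
--
--     if errors:
--         raise ValueError("\n".join(errors))
--
--     return "".join(modified_seq)
-- ===== SOURCE B (Python) =====
-- from typing import Dict, List
--
-- def verify_and_modify_sequence(sequence: str, mutations: List[tuple]) -> str:
--     """Verify mutations against sequence and modify if valid"""
--     if not mutations:
--         return sequence
--
--     # Phase one: validate every mutation and collect error messages.
--     errors = []
--     for wt, pos, mut in mutations:
--         idx = pos - 1
--         if idx >= len(sequence):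
--             errors.append(f"Error: Mutation position {pos} is outside sequence length {len(sequence)}")
--         elif sequence[idx] != wt:
--             errors.append(f"Error: Expected {wt} at position {pos} but found {sequence[idx]}")
--
--     if errors:
--         raise ValueError("\n".join(errors))
--
--     # Phase two: every mutation is valid, apply them all.
--     modified_seq = list(sequence)
--     for wt, pos, mut in mutations:
--         modified_seq[pos - 1] = mut
--     return "".join(modified_seq)
-- ===== Notes on version B (the rewrite author's own statement) =====
-- stated objective: simpler
-- what changed: Splits A's single interleaved verify-and-apply loop into two separate phases: one pass that only validates and collects error messages, then (only when validation succeeds) a second pass that applies every mutation; the apply step no longer needs 'continue' bookkeeping.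
import Mathlib
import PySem

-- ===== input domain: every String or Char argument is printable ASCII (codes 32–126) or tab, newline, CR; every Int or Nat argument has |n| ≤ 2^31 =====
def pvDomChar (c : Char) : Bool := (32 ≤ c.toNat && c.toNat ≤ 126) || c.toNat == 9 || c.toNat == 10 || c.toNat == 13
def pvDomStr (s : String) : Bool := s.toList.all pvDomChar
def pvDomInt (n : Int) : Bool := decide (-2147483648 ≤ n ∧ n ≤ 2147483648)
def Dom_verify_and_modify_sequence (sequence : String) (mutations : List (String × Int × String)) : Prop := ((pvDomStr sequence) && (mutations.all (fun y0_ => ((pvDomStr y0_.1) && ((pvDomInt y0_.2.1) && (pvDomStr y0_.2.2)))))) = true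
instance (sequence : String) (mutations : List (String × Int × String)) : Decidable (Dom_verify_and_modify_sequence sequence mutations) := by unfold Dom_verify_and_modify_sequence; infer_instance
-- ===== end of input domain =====

-- B splits A's single interleaved verify-and-apply loop into a validation pass followed by
-- a separate apply pass (objective: simpler; return values proved equal on Pre_).

-- ===== PORT A =====
-- f"Error: Mutation position {pos} is outside sequence length {len}"
def vamsMsgOut (pos : Int) (len : Int) : String :=
  "Error: Mutation position " ++ PySem.Int.toStr pos ++ " is outside sequence length " ++ PySem.Int.toStr len
-- f"Error: Expected {wt} at position {pos} but found {found}"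
def vamsMsgWt (wt : String) (pos : Int) (found : String) : String :=
  "Error: Expected " ++ wt ++ " at position " ++ PySem.Int.toStr pos ++ " but found " ++ found

-- A's single loop: carries modified_seq and errors together, `continue` on each error.
def vamsLoopA (seq : List Char) (muts : List (String × Int × String))
    (modified : List String) (errors : List String) : List String × List String :=
  match muts with
  | [] => (modified, errors)
  | (wt, pos, mu) :: rest =>
    let idx := pos - 1
    if idx ≥ (seq.length : Int) then
      vamsLoopA seq rest modified (errors ++ [vamsMsgOut pos (seq.length : Int)])
    else
      match PySem.List.pyGet? seq idx with
      | none => (modified, errors)  -- Python raises IndexError here (excluded by Pre_)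
      | some c =>
        if String.ofList [c] ≠ wt then
          vamsLoopA seq rest modified (errors ++ [vamsMsgWt wt pos (String.ofList [c])])
        else
          vamsLoopA seq rest (PySem.List.pySetD modified idx mu) errors

def verify_and_modify_sequence (sequence : String) (mutations : List (String × Int × String)) : String :=
  if mutations = [] then sequence
  else
    let r := vamsLoopA sequence.toList mutations (sequence.toList.map (fun c => String.ofList [c])) []
    if r.2 ≠ [] then "" -- Python raises ValueError("\n".join(errors)) here (excluded by Pre_)
    else String.join r.1

-- ===== PORT B =====
-- Phase one: a fold that only collects error messages.
def vamsErrors (seq : List Char) (muts : List (String × Int × String)) : List String :=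
  muts.foldl (fun errors m =>
    let (wt, pos, _) := m
    let idx := pos - 1
    if idx ≥ (seq.length : Int) then errors ++ [vamsMsgOut pos (seq.length : Int)]
    else
      match PySem.List.pyGet? seq idx with
      | none => errors  -- Python raises IndexError here (excluded by Pre_)
      | some c => if String.ofList [c] ≠ wt then errors ++ [vamsMsgWt wt pos (String.ofList [c])] else errors) []

-- Phase two: a fold that applies every mutation.
def vamsApply (muts : List (String × Int × String)) (modified : List String) : List String :=
  muts.foldl (fun m x => PySem.List.pySetD m (x.2.1 - 1) x.2.2) modified

def verify_and_modify_sequence_alt (sequence : String) (mutations : List (String × Int × String)) : String :=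
  if mutations = [] then sequence
  else if vamsErrors sequence.toList mutations ≠ [] then "" -- Python raises ValueError (excluded by Pre_)
  else String.join (vamsApply mutations (sequence.toList.map (fun c => String.ofList [c])))

-- ===== PRECONDITION & SPEC =====
-- Pre_ excludes exactly the inputs where A raises: a ValueError when some mutation's position is
-- past the end or its wild-type letter does not match, and an IndexError when pos - 1 < -len;
-- i.e. it requires every mutation's (possibly negative) index to hit a character equal to wt.
def Pre_verify_and_modify_sequence (sequence : String) (mutations : List (String × Int × String)) : Prop :=
  ∀ m ∈ mutations, (PySem.List.pyGet? sequence.toList (m.2.1 - 1)).map (fun c => String.ofList [c]) = some m.1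
instance (sequence : String) (mutations : List (String × Int × String)) : Decidable (Pre_verify_and_modify_sequence sequence mutations) := by unfold Pre_verify_and_modify_sequence; infer_instance
def pvWitness_verify_and_modify_sequence : String × (List (String × Int × String)) := ("ACD", [("C", 2, "W")])

def Spec_verify_and_modify_sequence (sequence : String) (mutations : List (String × Int × String)) (out : String) : Prop := out = verify_and_modify_sequence_alt sequence mutations
instance (sequence : String) (mutations : List (String × Int × String)) (out : String) : Decidable (Spec_verify_and_modify_sequence sequence mutations out) := by unfold Spec_verify_and_modify_sequence; infer_instance

-- ===== CLAIM (what is proved, stated in full; the proofs are below) =====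
def Claim_equal_verify_and_modify_sequence : Prop := ∀ (sequence : String) (mutations : List (String × Int × String)), Dom_verify_and_modify_sequence sequence mutations → Pre_verify_and_modify_sequence sequence mutations → Spec_verify_and_modify_sequence sequence mutations (verify_and_modify_sequence sequence mutations)

-- ===== LEMMAS AND PROOFS =====

-- A mutation admitted by Pre_ always takes A's "apply" branch: its index is in range.
theorem vams_valid_lt {seq : List Char} {pos : Int} {c : Char}
    (h : PySem.List.pyGet? seq (pos - 1) = some c) : ¬ pos - 1 ≥ (seq.length : Int) := by
  intro hge
  have : PySem.List.pyGet? seq (pos - 1) = none := by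
    rw [PySem.List.pyGet?_eq_none_iff]
    simp [PySem.Raise.InRange]
    omega
  simp [this] at h

-- Under Pre_, A's interleaved loop produces no errors and equals B's apply fold.
theorem vamsLoopA_valid (seq : List Char) (muts : List (String × Int × String))
    (hv : ∀ m ∈ muts, (PySem.List.pyGet? seq (m.2.1 - 1)).map (fun c => String.ofList [c]) = some m.1) :
    ∀ modified, vamsLoopA seq muts modified [] = (vamsApply muts modified, []) := by
  induction muts with
  | nil => intro modified; simp [vamsLoopA, vamsApply]
  | cons m rest ih =>
    intro modified
    obtain ⟨wt, pos, mu⟩ := m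
    have hm := hv (wt, pos, mu) (by simp)
    obtain ⟨c, hc, hwt⟩ : ∃ c, PySem.List.pyGet? seq (pos - 1) = some c ∧ String.ofList [c] = wt := by
      cases hget : PySem.List.pyGet? seq (pos - 1) with
      | none => simp [hget] at hm
      | some c => exact ⟨c, rfl, by simpa [hget] using hm⟩
    have hlt := vams_valid_lt hc
    have ihv := ih (fun m hm' => hv m (List.mem_cons_of_mem _ hm'))
    simp only [vamsLoopA, vamsApply, List.foldl_cons, hc, hlt, hwt]
    simpa [vamsApply] using ihv (PySem.List.pySetD modified (pos - 1) mu)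

-- Under Pre_, B's validation fold collects no errors.
theorem vamsErrors_valid (seq : List Char) (muts : List (String × Int × String))
    (hv : ∀ m ∈ muts, (PySem.List.pyGet? seq (m.2.1 - 1)).map (fun c => String.ofList [c]) = some m.1) :
    vamsErrors seq muts = [] := by
  induction muts with
  | nil => rfl
  | cons m rest ih =>
    obtain ⟨wt, pos, mu⟩ := m
    have hm := hv (wt, pos, mu) (by simp)
    obtain ⟨c, hc, hwt⟩ : ∃ c, PySem.List.pyGet? seq (pos - 1) = some c ∧ String.ofList [c] = wt := by
      cases hget : PySem.List.pyGet? seq (pos - 1) with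
      | none => simp [hget] at hm
      | some c => exact ⟨c, rfl, by simpa [hget] using hm⟩
    have hlt := vams_valid_lt hc
    have hlt' : ¬ ((seq.length : Int) < pos) := by omega
    have := ih (fun m hm' => hv m (List.mem_cons_of_mem _ hm'))
    simpa [vamsErrors, hc, hlt', hwt] using this

-- ===== VERDICT (by name: the statement is the Claim_ definition above) =====
theorem verify_and_modify_sequence_spec : Claim_equal_verify_and_modify_sequence := by
  intro sequence mutations _ hpre
  unfold Spec_verify_and_modify_sequence verify_and_modify_sequence verify_and_modify_sequence_alt
  by_cases hnil : mutations = []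
  · simp [hnil]
  · have hloop := vamsLoopA_valid sequence.toList mutations hpre
      (sequence.toList.map (fun c => String.ofList [c]))
    have herr := vamsErrors_valid sequence.toList mutations hpre
    simp [hnil, hloop, herr]
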